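-- pv_equiv track=rewrite | github.com/aquental/python-mcp-server | codesignal/mcp5.py | rag_retrieval
-- ===== SOURCE A (Python) =====
-- def rag_retrieval(query: str, documents: dict) -> dict | None:
--     """
--     Find the document with the highest keyword overlap with the query.
--
--     Returns:
--         The most relevant document dict, or None if no overlap found.
--     """
--     if not query.strip():
--         return None
--
--     query_words = set(query.lower().split())
--     best_doc = None
--     best_overlap = -1
--
--     for doc_id, doc in documents.items():
--         # Using content only (you could also include title if desired)
--         doc_words = set(doc["content"].lower().split())
--         overlap_count = len(query_words.intersection(doc_words))
--
--         if overlap_count > best_overlap: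
--             best_overlap = overlap_count
--             best_doc = doc
--
--     # Only return document if there was at least some overlap
--     return best_doc if best_overlap > 0 else None
-- ===== SOURCE B (Python) =====
-- def rag_retrieval(query: str, documents: dict) -> dict | None:
--     """Inverted-index re-implementation: index words -> doc ids once, score
--     query words through the index, then pick the first best-scoring document."""
--     if not query.strip():
--         return None
--
--     # inverted index: word -> list of doc_ids whose content contains it
--     index = {}
--     for doc_id, doc in documents.items():
--         for w in set(doc["content"].lower().split()):
--             index.setdefault(w, []).append(doc_id)
--
--     # overlap counts per doc_id, driven by the query's word set
--     counts = {}
--     for w in set(query.lower().split()):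
--         for doc_id in index.get(w, ()):
--             counts[doc_id] = counts.get(doc_id, 0) + 1
--
--     best_doc = None
--     best = 0
--     for doc_id, doc in documents.items():
--         c = counts.get(doc_id, 0)
--         if c > best:
--             best = c
--             best_doc = doc
--     return best_doc
-- ===== Notes on version B (the rewrite author's own statement) =====
-- stated objective: alternative
-- what changed: A intersects the query word set with each document's word set one document at a time; B builds an inverted index (word -> doc ids) over all documents once, accumulates per-doc overlap counts by walking the query's word set through the index, and then picks the first document with the maximal positive count.
import Mathlib
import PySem

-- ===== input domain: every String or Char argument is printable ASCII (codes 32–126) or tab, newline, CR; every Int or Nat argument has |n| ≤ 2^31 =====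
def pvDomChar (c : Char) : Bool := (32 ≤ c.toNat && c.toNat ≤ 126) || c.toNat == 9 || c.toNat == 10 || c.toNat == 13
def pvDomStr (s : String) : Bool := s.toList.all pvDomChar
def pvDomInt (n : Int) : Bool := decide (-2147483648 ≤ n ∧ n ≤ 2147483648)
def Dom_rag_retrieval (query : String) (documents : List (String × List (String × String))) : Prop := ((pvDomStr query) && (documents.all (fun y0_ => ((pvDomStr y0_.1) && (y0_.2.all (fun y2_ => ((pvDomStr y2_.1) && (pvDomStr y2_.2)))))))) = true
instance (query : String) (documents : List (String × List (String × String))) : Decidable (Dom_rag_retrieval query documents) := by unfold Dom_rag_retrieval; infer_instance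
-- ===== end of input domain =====

-- B replaces A's per-document set intersections by an inverted index (word -> doc ids) that scores
-- all documents in one pass over the query's word set; objective: alternative (idiomatic IR shape).

-- ===== PORT A =====
def rag_retrieval (query : String) (documents : List (String × List (String × String))) : Option (List (String × String)) :=
  if PySem.Str.strip query = "" then none
  else
    let query_words := PySem.Set.ofList (PySem.Str.split₀ (PySem.Str.lower query))
    let r := documents.foldl
      (fun (st : Option (List (String × String)) × Int) p =>
        let doc_words := PySem.Set.ofList (PySem.Str.split₀ (PySem.Str.lower ((PySem.Dict.mk p.2).getD "content" "")))
        let overlap_count := PySem.Set.len (PySem.Set.inter query_words doc_words)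
        if st.2 < overlap_count then (some p.2, overlap_count) else st)
      (none, -1)
    if 0 < r.2 then r.1 else none

-- ===== PORT B =====
def rag_retrieval_alt (query : String) (documents : List (String × List (String × String))) : Option (List (String × String)) :=
  if PySem.Str.strip query = "" then none
  else
    -- inverted index: word -> list of doc_ids whose content contains it
    let index : PySem.Dict String (List String) :=
      documents.foldl
        (fun idx p =>
          (PySem.Set.ofList (PySem.Str.split₀ (PySem.Str.lower ((PySem.Dict.mk p.2).getD "content" "")))).foldl
            (fun idx w => idx.modify w [] (fun ls => ls ++ [p.1])) idx)
        PySem.Dict.empty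
    -- overlap counts per doc_id, driven by the query's word set
    let counts : PySem.Dict String Int :=
      (PySem.Set.ofList (PySem.Str.split₀ (PySem.Str.lower query))).foldl
        (fun c w => (index.getD w []).foldl (fun c id => c.modify id 0 (· + 1)) c)
        PySem.Dict.empty
    let r := documents.foldl
      (fun (st : Option (List (String × String)) × Int) p =>
        let c := counts.getD p.1 0
        if st.2 < c then (some p.2, c) else st)
      (none, 0)
    r.1

-- ===== PRECONDITION & SPEC =====
-- Pre_ excludes documents in which some document lacks a "content" key (there Python A raises
-- KeyError) and association lists with duplicate doc_ids, which do not represent any Python dict.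
def Pre_rag_retrieval (query : String) (documents : List (String × List (String × String))) : Prop :=
  (documents.map Prod.fst).Nodup ∧ ∀ p ∈ documents, (PySem.Dict.mk p.2).contains "content" = true
instance (query : String) (documents : List (String × List (String × String))) : Decidable (Pre_rag_retrieval query documents) := by unfold Pre_rag_retrieval; infer_instance

def pvWitness_rag_retrieval : String × (List (String × List (String × String))) :=
  ("the cat", [("d1", [("content", "a cat sat")]), ("d2", [("content", "no dogs")])])

def Spec_rag_retrieval (query : String) (documents : List (String × List (String × String))) (out : Option (List (String × String))) : Prop := out = rag_retrieval_alt query documents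
instance (query : String) (documents : List (String × List (String × String))) (out : Option (List (String × String))) : Decidable (Spec_rag_retrieval query documents out) := by unfold Spec_rag_retrieval; infer_instance

-- ===== CLAIM (what is proved, stated in full; the proofs are below) =====
def Claim_equal_rag_retrieval : Prop := ∀ (query : String) (documents : List (String × List (String × String))), Dom_rag_retrieval query documents → Pre_rag_retrieval query documents → Spec_rag_retrieval query documents (rag_retrieval query documents)

-- ===== LEMMAS AND PROOFS =====

-- the (deduplicated) word set of a document's content, as both ports compute it
def pvDw (p : String × List (String × String)) : List String :=
  PySem.Set.ofList (PySem.Str.split₀ (PySem.Str.lower ((PySem.Dict.mk p.2).getD "content" "")))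

-- inner loop of the index build: appending one doc id under each of its (distinct) words
theorem pv_index_inner (ws : List String) (hws : ws.Nodup) (a : String) (w : String) :
    ∀ (idx : PySem.Dict String (List String)),
    (ws.foldl (fun idx w' => idx.modify w' [] (fun ls => ls ++ [a])) idx).getD w []
      = idx.getD w [] ++ (if w ∈ ws then [a] else []) := by
  induction ws with
  | nil => simp
  | cons x t ih =>
    intro idx
    simp only [List.nodup_cons] at hws
    simp only [List.foldl_cons]
    rw [ih hws.2]
    rw [PySem.Dict.getD_modify]
    by_cases hwx : w = x
    · subst hwx
      simp [hws.1]
    · simp [hwx, List.mem_cons]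

-- whole index build: for each word, the ids of the documents containing it, in order
theorem pv_index (l : List (String × List (String × String))) (w : String) :
    ∀ (idx : PySem.Dict String (List String)),
    (l.foldl
        (fun idx p => (pvDw p).foldl (fun idx w' => idx.modify w' [] (fun ls => ls ++ [p.1])) idx)
        idx).getD w []
      = idx.getD w [] ++ (l.filter (fun p => decide (w ∈ pvDw p))).map Prod.fst := by
  induction l with
  | nil => simp
  | cons p t ih =>
    intro idx
    simp only [List.foldl_cons, List.filter_cons]
    rw [ih]
    rw [pv_index_inner (pvDw p) (by unfold pvDw; exact PySem.Set.nodup_ofList _) p.1 w]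
    by_cases hw : w ∈ pvDw p
    · simp [pvDw] at hw ⊢
      simp [hw]
    · simp [pvDw] at hw ⊢
      simp [hw]

-- counting loop: final count of a key is the sum of its counts over the per-word id lists
theorem pv_counts (getIds : String → List String) (ws : List String) (k : String) :
    ∀ (c : PySem.Dict String Int),
    (ws.foldl (fun c w => (getIds w).foldl (fun c id => c.modify id 0 (· + 1)) c) c).getD k 0
      = c.getD k 0 + ((ws.map (fun w => ((getIds w).count k : Int))).sum) := by
  induction ws with
  | nil => simp
  | cons x t ih =>
    intro c
    simp only [List.foldl_cons, List.map_cons, List.sum_cons]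
    rw [ih]
    rw [PySem.Dict.getD_foldl_modify_add_one]
    ring

-- distinct doc ids make the pair determined by its id
theorem pv_fst_inj (l : List (String × List (String × String)))
    (h : (l.map Prod.fst).Nodup) :
    ∀ p ∈ l, ∀ q ∈ l, p.1 = q.1 → p = q := by
  induction l with
  | nil => simp
  | cons a t ih =>
    simp only [List.map_cons, List.nodup_cons] at h
    intro p hp q hq he
    rcases List.mem_cons.mp hp with rfl | hp'
    · rcases List.mem_cons.mp hq with rfl | hq'
      · rfl
      · have hm : q.1 ∈ t.map Prod.fst := List.mem_map_of_mem (f := Prod.fst) hq'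
        rw [← he] at hm
        exact absurd hm h.1
    · rcases List.mem_cons.mp hq with rfl | hq'
      · have hm : p.1 ∈ t.map Prod.fst := List.mem_map_of_mem (f := Prod.fst) hp'
        rw [he] at hm
        exact absurd hm h.1
      · exact ih h.2 p hp' q hq' he

-- with distinct ids, a document's id occurs in a word's id list iff the word is in the document
theorem pv_count_ids (l : List (String × List (String × String)))
    (h : (l.map Prod.fst).Nodup) (p : String × List (String × String)) (hp : p ∈ l) (w : String) :
    ((l.filter (fun q => decide (w ∈ pvDw q))).map Prod.fst).count p.1
      = if w ∈ pvDw p then 1 else 0 := by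
  have hsub : ((l.filter (fun q => decide (w ∈ pvDw q))).map Prod.fst).Sublist (l.map Prod.fst) :=
    List.Sublist.map Prod.fst (List.filter_sublist)
  have hnd := hsub.nodup h
  have hmem : p.1 ∈ (l.filter (fun q => decide (w ∈ pvDw q))).map Prod.fst ↔ w ∈ pvDw p := by
    constructor
    · intro hm
      rcases List.mem_map.mp hm with ⟨q, hq, he⟩
      rcases List.mem_filter.mp hq with ⟨hql, hqw⟩
      have := pv_fst_inj l h q hql p hp he
      subst this
      exact of_decide_eq_true hqw
    · intro hw
      exact List.mem_map_of_mem (List.mem_filter.mpr ⟨hp, decide_eq_true hw⟩)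
  by_cases hw : w ∈ pvDw p
  · simp only [hw, if_true]
    have h1 : 0 < ((l.filter (fun q => decide (w ∈ pvDw q))).map Prod.fst).count p.1 :=
      List.count_pos_iff.mpr (hmem.mpr hw)
    have h2 := List.nodup_iff_count_le_one.mp hnd p.1
    omega
  · simp only [hw, if_false]
    rw [List.count_eq_zero]
    exact fun hm => hw (hmem.mp hm)

-- the generic selection step both ports run over the documents
def pvStep (ov : (String × List (String × String)) → Int)
    (st : Option (List (String × String)) × Int) (p : String × List (String × String)) :
    Option (List (String × String)) × Int :=
  if st.2 < ov p then (some p.2, ov p) else st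

-- relate the two accumulators: A starts at (none, -1), B at (none, 0)
theorem pv_sel (ov : (String × List (String × String)) → Int)
    (hov : ∀ p, 0 ≤ ov p) (l : List (String × List (String × String))) :
    ∀ (sA sB : Option (List (String × String)) × Int),
    ((sA.2 ≤ 0 ∧ sB = (none, 0)) ∨ (0 < sA.2 ∧ sA = sB)) →
    ((l.foldl (pvStep ov) sA).2 ≤ 0 ∧ l.foldl (pvStep ov) sB = (none, 0)) ∨
      (0 < (l.foldl (pvStep ov) sA).2 ∧ l.foldl (pvStep ov) sA = l.foldl (pvStep ov) sB) := by
  induction l with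
  | nil => intro sA sB h; simpa using h
  | cons p t ih =>
    intro sA sB h
    simp only [List.foldl_cons]
    apply ih
    have hovp := hov p
    rcases h with ⟨h1, rfl⟩ | ⟨h1, rfl⟩
    · by_cases hc : 0 < ov p
      · have hlt : sA.2 < ov p := by omega
        right
        constructor
        · show 0 < (pvStep ov sA p).2
          simp [pvStep, hlt]
          omega
        · simp [pvStep, hlt, hc]
      · have h0 : ov p = 0 := by omega
        left
        refine ⟨?_, by simp [pvStep, h0]⟩
        unfold pvStep
        split
        · simp [h0]
        · exact h1
    · right
      refine ⟨?_, rfl⟩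
      show 0 < (pvStep ov sA p).2
      unfold pvStep
      split
      · show 0 < ov p
        omega
      · exact h1

-- ===== VERDICT (by name: the statement is the Claim_ definition above) =====
-- the overlap score A computes for one document
def pvOv (query_words : List String) (p : String × List (String × String)) : Int :=
  PySem.Set.len (PySem.Set.inter query_words (pvDw p))

-- the inverted index and the counts dictionary B builds (proof-side names for B's folds)
def pvIndex (docs : List (String × List (String × String))) : PySem.Dict String (List String) :=
  docs.foldl
    (fun idx p => (pvDw p).foldl (fun idx w' => idx.modify w' [] (fun ls => ls ++ [p.1])) idx)
    PySem.Dict.empty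

def pvCounts (qw : List String) (docs : List (String × List (String × String))) :
    PySem.Dict String Int :=
  qw.foldl (fun c w => ((pvIndex docs).getD w []).foldl (fun c id => c.modify id 0 (· + 1)) c)
    PySem.Dict.empty

theorem pv_counts_eq_ov (docs : List (String × List (String × String)))
    (hnd : (docs.map Prod.fst).Nodup) (qw : List String)
    (p : String × List (String × String)) (hp : p ∈ docs) :
    (pvCounts qw docs).getD p.1 0 = pvOv qw p := by
  unfold pvCounts
  rw [pv_counts]
  rw [PySem.Dict.getD_empty, zero_add]
  have hterm : ∀ w, (((pvIndex docs).getD w []).count p.1 : Int)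
      = if w ∈ pvDw p then (1 : Int) else 0 := by
    intro w
    unfold pvIndex
    rw [pv_index docs w PySem.Dict.empty, PySem.Dict.getD_empty, List.nil_append]
    rw [pv_count_ids docs hnd p hp w]
    split <;> simp
  calc (qw.map (fun w => (((pvIndex docs).getD w []).count p.1 : Int))).sum
      = (qw.map (fun w => if decide (w ∈ pvDw p) = true then (1 : Int) else 0)).sum := by
        apply congrArg
        apply List.map_congr_left
        intro w _
        rw [hterm w]
        simp
    _ = ((qw.countP (fun w => decide (w ∈ pvDw p)) : Nat) : Int) :=
        PySem.List.sum_map_ite_one_zero _ qw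
    _ = pvOv qw p := by
        unfold pvOv PySem.Set.len PySem.Set.inter
        rw [List.countP_eq_length_filter]
        have hf : List.filter (fun w => decide (w ∈ pvDw p)) qw
            = List.filter (fun x => PySem.Set.contains (pvDw p) x) qw := by
          apply List.filter_congr
          intro w _
          rw [Bool.eq_iff_iff]
          simp
        rw [hf]

-- the whole comparison, phrased on the proof-side names (definitionally B's and A's bodies)
theorem pv_main (qw : List String) (docs : List (String × List (String × String)))
    (hnd : (docs.map Prod.fst).Nodup) :
    (if 0 < (docs.foldl (pvStep (pvOv qw)) (none, -1)).2
      then (docs.foldl (pvStep (pvOv qw)) (none, -1)).1 else none)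
      = (docs.foldl
          (fun (st : Option (List (String × String)) × Int) p =>
            if st.2 < (pvCounts qw docs).getD p.1 0
              then (some p.2, (pvCounts qw docs).getD p.1 0) else st)
          (none, 0)).1 := by
  have hB : docs.foldl
      (fun (st : Option (List (String × String)) × Int) p =>
        if st.2 < (pvCounts qw docs).getD p.1 0
          then (some p.2, (pvCounts qw docs).getD p.1 0) else st)
      (none, 0)
      = docs.foldl (pvStep (pvOv qw)) (none, 0) := by
    apply PySem.List.foldl_congr_mem
    intro acc p hp
    unfold pvStep
    rw [pv_counts_eq_ov docs hnd qw p hp]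
  rw [hB]
  have hov : ∀ p, 0 ≤ pvOv qw p := by
    intro p
    unfold pvOv PySem.Set.len
    exact Int.natCast_nonneg _
  rcases pv_sel (pvOv qw) hov docs (none, -1) (none, 0) (Or.inl ⟨by norm_num, rfl⟩) with
    ⟨hle, heq⟩ | ⟨hpos, heq⟩
  · rw [if_neg (by omega), heq]
  · rw [if_pos hpos, heq]

-- ===== VERDICT (by name: the statement is the Claim_ definition above) =====
theorem rag_retrieval_spec : Claim_equal_rag_retrieval := by
  intro q docs hdom hpre
  obtain ⟨hnd, -⟩ := hpre
  unfold Spec_rag_retrieval rag_retrieval rag_retrieval_alt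
  by_cases hs : PySem.Str.strip q = ""
  · rw [if_pos hs, if_pos hs]
  · rw [if_neg hs, if_neg hs]
    exact pv_main (PySem.Set.ofList (PySem.Str.split₀ (PySem.Str.lower q))) docs hnd
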